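-- pv_equiv track=rewrite | github.com/RawRapter/python-vscode | ProgPracFol/BasicsProgramSet5.py | BinaryStringCheck1
-- ===== SOURCE A (Python) =====
-- def BinaryStringCheck1(x):
--     t = "01"
--     count = 0
--     for i in x:
--         if i not in t:
--             count = 1
--             break
--         else:
--             pass
--     if count == 1:
--         return "Yes it is binary"
--     else:
--         return "It is not binary"
-- ===== SOURCE B (Python) =====
-- def BinaryStringCheck1(x):
--     # Arithmetic tally: the characters of x are all binary digits exactly when
--     # the occurrences of '0' plus the occurrences of '1' account for the whole
--     # length; keeps A's (inverted) labels exactly.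
--     chars = list(x)
--     if chars.count("0") + chars.count("1") == len(chars):
--         return "It is not binary"
--     return "Yes it is binary"
-- ===== Notes on version B (the rewrite author's own statement) =====
-- stated objective: alternative
-- what changed: Replaced the flag-and-early-break membership scan with an arithmetic tally: count the occurrences of '0' and of '1' and compare their sum with the string length, with no per-character membership test or break; A's inverted labels are preserved.
import Mathlib
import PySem

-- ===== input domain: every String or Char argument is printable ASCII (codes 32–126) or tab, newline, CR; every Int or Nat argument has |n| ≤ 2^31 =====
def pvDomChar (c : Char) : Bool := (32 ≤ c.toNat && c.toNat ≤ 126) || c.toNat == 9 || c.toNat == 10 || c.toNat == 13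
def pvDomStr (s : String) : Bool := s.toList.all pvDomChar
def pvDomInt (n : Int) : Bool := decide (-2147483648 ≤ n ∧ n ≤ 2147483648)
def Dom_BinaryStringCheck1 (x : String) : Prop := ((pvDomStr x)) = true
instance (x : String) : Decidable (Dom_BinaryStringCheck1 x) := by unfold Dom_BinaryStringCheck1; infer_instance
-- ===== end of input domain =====

-- B replaces A's flag-and-early-break membership scan by an arithmetic tally
-- (count of '0' plus count of '1' compared with the length); objective: alternative.

-- ===== PORT A =====
-- the 'for i in x: if i not in t: count = 1; break' loop, on the running count
def pvLoopA (t : String) : List Char → Nat → Nat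
  | [], count => count
  | i :: rest, count =>
      if ¬ (t.toList.contains i) then 1 else pvLoopA t rest count

def BinaryStringCheck1 (x : String) : String :=
  let t := "01"
  let count := pvLoopA t x.toList 0
  if count == 1 then "Yes it is binary" else "It is not binary"

-- ===== PORT B =====
def BinaryStringCheck1_alt (x : String) : String :=
  let chars := x.toList
  if chars.count '0' + chars.count '1' == chars.length then
    "It is not binary"
  else
    "Yes it is binary"

-- ===== PRECONDITION & SPEC =====
def Spec_BinaryStringCheck1 (x : String) (out : String) : Prop := out = BinaryStringCheck1_alt x
instance (x : String) (out : String) : Decidable (Spec_BinaryStringCheck1 x out) := by unfold Spec_BinaryStringCheck1; infer_instance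

-- ===== CLAIM (what is proved, stated in full; the proofs are below) =====
def Claim_equal_BinaryStringCheck1 : Prop := ∀ (x : String), Dom_BinaryStringCheck1 x → Spec_BinaryStringCheck1 x (BinaryStringCheck1 x)

-- ===== LEMMAS AND PROOFS =====
lemma pvLoopA_eq_one_iff (cs : List Char) :
    pvLoopA "01" cs 0 = 1 ↔ ∃ c ∈ cs, c ≠ '0' ∧ c ≠ '1' := by
  induction cs with
  | nil => simp [pvLoopA]
  | cons c rest ih =>
      by_cases h : c = '0' ∨ c = '1'
      · rcases h with h | h <;> subst h <;> simpa [pvLoopA] using ih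
      · rw [not_or] at h
        refine iff_of_true ?_ ⟨c, by simp, h.1, h.2⟩
        rw [pvLoopA, if_pos (by simp; exact h)]

lemma pvCountSum_eq_countP (cs : List Char) :
    cs.count '0' + cs.count '1' = cs.countP (fun c => c == '0' || c == '1') := by
  induction cs with
  | nil => rfl
  | cons c rest ih =>
      by_cases h0 : c = '0' <;> by_cases h1 : c = '1' <;>
        simp_all <;> omega

lemma pvCountSum_eq_iff (cs : List Char) :
    (cs.count '0' + cs.count '1' = cs.length) ↔ ¬ ∃ c ∈ cs, c ≠ '0' ∧ c ≠ '1' := by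
  rw [pvCountSum_eq_countP, List.countP_eq_length]
  constructor
  · rintro hall ⟨c, hc, h0, h1⟩
    have := hall c hc
    simp at this
    tauto
  · intro hno c hc
    by_contra hcc
    simp at hcc
    exact hno ⟨c, hc, hcc.1, hcc.2⟩

-- ===== VERDICT (by name: the statement is the Claim_ definition above) =====
theorem BinaryStringCheck1_spec : Claim_equal_BinaryStringCheck1 := by
  intro x _
  unfold Spec_BinaryStringCheck1
  simp only [BinaryStringCheck1, BinaryStringCheck1_alt]
  by_cases h : ∃ c ∈ x.toList, c ≠ '0' ∧ c ≠ '1'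
  · have hloop : pvLoopA "01" x.toList 0 = 1 := (pvLoopA_eq_one_iff x.toList).mpr h
    have hcnt : ¬ (x.toList.count '0' + x.toList.count '1' = x.toList.length) :=
      fun he => ((pvCountSum_eq_iff x.toList).mp he) h
    have hb : (x.toList.count '0' + x.toList.count '1' == x.toList.length) = false :=
      beq_eq_false_iff_ne.mpr hcnt
    rw [hloop, hb]
    simp
  · have hloop : pvLoopA "01" x.toList 0 ≠ 1 :=
      fun h1 => h ((pvLoopA_eq_one_iff x.toList).mp h1)
    have hcnt : x.toList.count '0' + x.toList.count '1' = x.toList.length :=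
      (pvCountSum_eq_iff x.toList).mpr h
    have hb : (x.toList.count '0' + x.toList.count '1' == x.toList.length) = true :=
      beq_iff_eq.mpr hcnt
    rw [hb, if_neg (by simpa using hloop)]
    simp
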